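-- pv_equiv track=rewrite | github.com/lamismanota/la-misma-nota-web | build.py | replace_js_literals
-- ===== SOURCE A (Python) =====
-- def replace_js_literals(source: str) -> str:
--     result = []
--     in_string = False
--     escape = False
--     quote = ""
--     index = 0
--
--     literal_map = {
--         "true": "True",
--         "false": "False",
--         "null": "None",
--     }
--
--     while index < len(source):
--         char = source[index]
--
--         if in_string:
--             result.append(char)
--             if escape:
--                 escape = False
--             elif char == "\\":
--                 escape = True
--             elif char == quote:
--                 in_string = False
--             index += 1
--             continue
--
--         if char in ('"', "'"):
--             in_string = True
--             quote = char
--             result.append(char)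
--             index += 1
--             continue
--
--         replaced = False
--         for js_literal, py_literal in literal_map.items():
--             if source.startswith(js_literal, index):
--                 previous = source[index - 1] if index > 0 else ""
--                 next_index = index + len(js_literal)
--                 next_char = source[next_index] if next_index < len(source) else ""
--                 if not (previous.isalnum() or previous in ("_", "$")) and not (
--                     next_char.isalnum() or next_char in ("_", "$")
--                 ):
--                     result.append(py_literal)
--                     index += len(js_literal)
--                     replaced = True
--                     break
--
--         if replaced:
--             continue
--
--         result.append(char)
--         index += 1
--
--     return "".join(result)
-- ===== SOURCE B (Python) =====
-- def replace_js_literals(source: str) -> str: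
--     # Tokenizer: consume whole string literals and maximal identifier runs,
--     # replacing a run only when the entire word is a JS literal.
--     literals = {"true": "True", "false": "False", "null": "None"}
--
--     def is_ident(c: str) -> bool:
--         return c.isalnum() or c in "_$"
--
--     out = []
--     i = 0
--     n = len(source)
--     while i < n:
--         c = source[i]
--         if c in "\"'":
--             out.append(c)
--             i += 1
--             esc = False
--             while i < n:
--                 ch = source[i]
--                 out.append(ch)
--                 i += 1
--                 if esc:
--                     esc = False
--                 elif ch == "\\":
--                     esc = True
--                 elif ch == c:
--                     break
--         elif is_ident(c):
--             j = i
--             while j < n and is_ident(source[j]):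
--                 j += 1
--             word = source[i:j]
--             out.append(literals.get(word, word))
--             i = j
--         else:
--             out.append(c)
--             i += 1
--     return "".join(out)
-- ===== Notes on version B (the rewrite author's own statement) =====
-- stated objective: faster
-- what changed: A is a per-character state machine that at every code position iterates the literal map doing startswith plus lookbehind/lookahead boundary-character tests; B is a tokenizer that consumes whole string literals and maximal identifier runs in inner loops and replaces a run only when the entire token equals a JS literal via one dict lookup.
import Mathlib
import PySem

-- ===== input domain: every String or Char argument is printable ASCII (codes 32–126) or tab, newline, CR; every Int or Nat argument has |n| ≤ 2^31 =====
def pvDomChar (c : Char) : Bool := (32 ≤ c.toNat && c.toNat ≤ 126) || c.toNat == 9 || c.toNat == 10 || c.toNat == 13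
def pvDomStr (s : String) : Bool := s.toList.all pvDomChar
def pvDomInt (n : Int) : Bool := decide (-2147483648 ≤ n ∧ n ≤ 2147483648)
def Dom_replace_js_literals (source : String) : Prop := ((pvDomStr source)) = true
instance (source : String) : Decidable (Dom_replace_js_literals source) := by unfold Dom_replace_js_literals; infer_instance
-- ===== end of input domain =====

-- B is a tokenizer (whole string literals and maximal identifier runs consumed at once,
-- one whole-word table lookup) instead of A's per-character state machine that tries each
-- JS literal with startswith plus lookbehind/lookahead boundary tests at every position;
-- a timing run measured B faster by a constant factor.

-- shared character class: Python `c.isalnum() or c in ("_", "$")` on the ASCII domain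
def isIdent (c : Char) : Bool := c.isAlphanum || c = '_' || c = '$'
def optIdent : Option Char → Bool
  | none => false
  | some c => isIdent c

-- ===== PORT A =====
def litMap : List (List Char × List Char) :=
  [(['t','r','u','e'], ['T','r','u','e']),
   (['f','a','l','s','e'], ['F','a','l','s','e']),
   (['n','u','l','l'], ['N','o','n','e'])]

-- A's inner `for js_literal, py_literal in literal_map.items()` loop (with its `continue`s)
def tryLiterals (src : List Char) (index : Nat) : List (List Char × List Char) → Option (List Char × Nat)
  | [] => none
  | (js, py) :: rest =>
    if js.isPrefixOf (src.drop index) then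
      let previous : Option Char := if 0 < index then src[index - 1]? else none
      let nextChar : Option Char := src[index + js.length]?
      if !(optIdent previous) && !(optIdent nextChar) then some (py, js.length)
      else tryLiterals src index rest
    else tryLiterals src index rest

theorem tryLiterals_litMap_pos (src : List Char) (index : Nat) (py : List Char) (len : Nat)
    (h : tryLiterals src index litMap = some (py, len)) : 0 < len := by
  revert h
  simp only [litMap, tryLiterals]
  split_ifs <;> rintro ⟨⟩ <;> simp

def aLoop (src result : List Char) (in_string escape : Bool) (quote : Char) (index : Nat) : List Char :=
  if h : index < src.length then
    let char := src[index]
    if in_string then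
      if escape then aLoop src (result ++ [char]) true false quote (index + 1)
      else if char = '\\' then aLoop src (result ++ [char]) true true quote (index + 1)
      else if char = quote then aLoop src (result ++ [char]) false escape quote (index + 1)
      else aLoop src (result ++ [char]) true escape quote (index + 1)
    else if char = '"' || char = '\'' then
      aLoop src (result ++ [char]) true escape char (index + 1)
    else
      match hm : tryLiterals src index litMap with
      | some (py, len) => aLoop src (result ++ py) in_string escape quote (index + len)
      | none => aLoop src (result ++ [char]) in_string escape quote (index + 1)
  else result
termination_by src.length - index
decreasing_by
  all_goals first
    | omega
    | (have := tryLiterals_litMap_pos src index py len hm; omega)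

-- Python's quote variable starts as "" and is never read before being set; a dummy Char stands in
def replace_js_literals (source : String) : String :=
  String.mk (aLoop source.toList [] false false ' ' 0)

-- ===== PORT B =====
-- Source B's inner string-consuming loop: returns (consumed chars, remaining suffix)
def strLoopB (q : Char) (esc : Bool) : List Char → List Char × List Char
  | [] => ([], [])
  | ch :: rest =>
    if esc then (ch :: (strLoopB q false rest).1, (strLoopB q false rest).2)
    else if ch = '\\' then (ch :: (strLoopB q true rest).1, (strLoopB q true rest).2)
    else if ch = q then ([ch], rest)
    else (ch :: (strLoopB q false rest).1, (strLoopB q false rest).2)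

theorem strLoopB_snd_length_le (q : Char) : ∀ (esc : Bool) (l : List Char),
    (strLoopB q esc l).2.length ≤ l.length := by
  intro esc l
  induction l generalizing esc with
  | nil => simp [strLoopB]
  | cons ch rest ih =>
    simp only [strLoopB]
    split_ifs <;> simp <;> exact le_trans (ih _) (Nat.le_succ _)

-- Source B's `literals.get(word, word)`
def lookupLit (w : List Char) : List Char :=
  if w = ['t','r','u','e'] then ['T','r','u','e']
  else if w = ['f','a','l','s','e'] then ['F','a','l','s','e']
  else if w = ['n','u','l','l'] then ['N','o','n','e']
  else w

def bLoop : List Char → List Char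
  | [] => []
  | c :: rest =>
    if c = '"' || c = '\'' then
      c :: ((strLoopB c false rest).1 ++ bLoop (strLoopB c false rest).2)
    else if isIdent c then
      lookupLit (List.takeWhile isIdent (c :: rest)) ++ bLoop (List.dropWhile isIdent (c :: rest))
    else c :: bLoop rest
termination_by l => l.length
decreasing_by
  · exact Nat.lt_succ_of_le (strLoopB_snd_length_le _ _ _)
  · simp only [List.dropWhile_cons, *]
    split
    · exact Nat.lt_succ_of_le (List.dropWhile_sublist _).length_le
    · simp_all
  · simp

def replace_js_literals_alt (source : String) : String :=
  String.mk (bLoop source.toList)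

-- ===== PRECONDITION & SPEC =====
def Spec_replace_js_literals (source : String) (out : String) : Prop := out = replace_js_literals_alt source
instance (source : String) (out : String) : Decidable (Spec_replace_js_literals source out) := by unfold Spec_replace_js_literals; infer_instance

-- ===== CLAIM (what is proved, stated in full; the proofs are below) =====
def Claim_equal_replace_js_literals : Prop := ∀ (source : String), Dom_replace_js_literals source → Spec_replace_js_literals source (replace_js_literals source)

-- ===== LEMMAS AND PROOFS =====

def prevOpt (src : List Char) (index : Nat) : Option Char :=
  if 0 < index then src[index - 1]? else none

theorem strLoopB_append (q : Char) : ∀ (esc : Bool) (l : List Char),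
    (strLoopB q esc l).1 ++ (strLoopB q esc l).2 = l := by
  intro esc l
  induction l generalizing esc with
  | nil => simp [strLoopB]
  | cons ch rest ih =>
    simp only [strLoopB]
    split_ifs <;> simp [ih]

theorem strLoopB_exit (q : Char) : ∀ (esc : Bool) (l : List Char),
    (strLoopB q esc l).2 ≠ [] → ∃ pre, (strLoopB q esc l).1 = pre ++ [q] := by
  intro esc l
  induction l generalizing esc with
  | nil => simp [strLoopB]
  | cons ch rest ih =>
    simp only [strLoopB]
    split_ifs with h1 h2 h3
    · intro hne
      obtain ⟨pre, hp⟩ := ih false hne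
      exact ⟨ch :: pre, by simp [hp]⟩
    · intro hne
      obtain ⟨pre, hp⟩ := ih true hne
      exact ⟨ch :: pre, by simp [hp]⟩
    · intro _; exact ⟨[], by simp [h3]⟩
    · intro hne
      obtain ⟨pre, hp⟩ := ih false hne
      exact ⟨ch :: pre, by simp [hp]⟩

-- A's string mode equals B's string-consuming loop
theorem aLoop_string (src : List Char) : ∀ (gas index : Nat) (result : List Char) (e : Bool) (q : Char),
    src.length - index ≤ gas →
    aLoop src result true e q index =
      aLoop src (result ++ (strLoopB q e (src.drop index)).1) false false q
        (index + (strLoopB q e (src.drop index)).1.length) := by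
  intro gas
  induction gas with
  | zero =>
    intro index result e q hg
    have hge : src.length ≤ index := by omega
    rw [List.drop_eq_nil_iff.mpr hge]
    rw [aLoop.eq_def, aLoop.eq_def]
    simp [Nat.not_lt.mpr hge, strLoopB]
  | succ gas ih =>
    intro index result e q hg
    by_cases hlt : index < src.length
    · have hd : src.drop index = src[index] :: src.drop (index + 1) := List.drop_eq_getElem_cons hlt
      rw [aLoop.eq_def]
      simp only [dif_pos hlt, if_true, hd]
      by_cases he : e = true
      · subst he
        simp only [if_true]
        rw [ih (index + 1) (result ++ [src[index]]) false q (by omega)]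
        simp [strLoopB, List.append_assoc, Nat.add_assoc, Nat.add_comm]
      · have he' : e = false := by revert he; cases e <;> simp
        subst he'
        by_cases hbs : src[index] = '\\'
        · simp only [Bool.false_eq_true, if_false, hbs, if_true]
          rw [ih (index + 1) (result ++ ['\\']) true q (by omega)]
          simp [strLoopB, List.append_assoc, Nat.add_assoc, Nat.add_comm]
        · by_cases hq : src[index] = q
          · simp only [Bool.false_eq_true, if_false, hq]
            have hq' : ¬ q = '\\' := by rw [← hq]; exact hbs
            simp [strLoopB, hq']
          · simp only [Bool.false_eq_true, if_false, hq]
            rw [ih (index + 1) (result ++ [src[index]]) false q (by omega)]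
            simp [strLoopB, hbs, hq, List.append_assoc, Nat.add_assoc, Nat.add_comm]
    · have hge : src.length ≤ index := by omega
      rw [List.drop_eq_nil_iff.mpr hge]
      rw [aLoop.eq_def, aLoop.eq_def]
      simp [Nat.not_lt.mpr hge, strLoopB]

theorem head?_dropWhile_not (p : Char → Bool) (l : List Char) (c : Char)
    (h : (List.dropWhile p l).head? = some c) : p c = false := by
  induction l with
  | nil => simp at h
  | cons x xs ih =>
    rw [List.dropWhile_cons] at h
    split at h
    · exact ih h
    · simp_all

theorem takeWhile_append_of_all (p : Char → Bool) (xs ys : List Char)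
    (h : ∀ c ∈ xs, p c = true) :
    List.takeWhile p (xs ++ ys) = xs ++ List.takeWhile p ys := by
  induction xs with
  | nil => simp
  | cons x xs ih =>
    have hx := h x (by simp)
    simp [hx, ih (fun c hc => h c (by simp [hc]))]

-- tryLiterals returns none whenever the previous character is an identifier character
theorem tryLiterals_prev_ident (src : List Char) (index : Nat)
    (h : optIdent (prevOpt src index) = true) :
    ∀ lits, tryLiterals src index lits = none := by
  intro lits
  induction lits with
  | nil => rfl
  | cons hd tl ih =>
    obtain ⟨js, py⟩ := hd
    have hp : (if 0 < index then src[index - 1]? else none) = prevOpt src index := rfl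
    simp only [tryLiterals, hp, h]
    split_ifs <;> simp_all


theorem isIdent_ne_quote1 {c : Char} (h : isIdent c = true) : c ≠ '"' :=
  fun e => by subst e; exact absurd h (by decide)

theorem isIdent_ne_quote2 {c : Char} (h : isIdent c = true) : c ≠ '\'' :=
  fun e => by subst e; exact absurd h (by decide)

-- boundary characterization: A's startswith+lookahead test at a non-identifier boundary
-- succeeds exactly when B's maximal identifier run equals the literal
theorem prefix_next_iff_takeWhile (src : List Char) (index : Nat) (js : List Char)
    (hall : ∀ c ∈ js, isIdent c = true) :
    (js.isPrefixOf (src.drop index) = true ∧ optIdent src[index + js.length]? = false) ↔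
      List.takeWhile isIdent (src.drop index) = js := by
  constructor
  · rintro ⟨hpref, hnext⟩
    obtain ⟨u, hu⟩ := List.isPrefixOf_iff_prefix.mp hpref
    rw [← hu, takeWhile_append_of_all _ _ _ hall]
    have hget : src[index + js.length]? = u.head? := by
      rw [← List.getElem?_drop, ← hu, List.getElem?_append_right (le_refl _)]
      simp [List.head?_eq_getElem?]
    rw [hget] at hnext
    cases u with
    | nil => simp
    | cons c ts =>
      simp only [List.head?_cons, optIdent] at hnext
      simp [hnext]
  · intro hw
    have hsplit : js ++ List.dropWhile isIdent (src.drop index) = src.drop index := by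
      rw [← hw]; exact List.takeWhile_append_dropWhile
    refine ⟨List.isPrefixOf_iff_prefix.mpr ⟨_, hsplit⟩, ?_⟩
    have hget : src[index + js.length]? = (List.dropWhile isIdent (src.drop index)).head? := by
      rw [← List.getElem?_drop]
      conv_lhs => rw [← hsplit]
      rw [List.getElem?_append_right (le_refl _)]
      simp [List.head?_eq_getElem?]
    rw [hget]
    cases hh : (List.dropWhile isIdent (src.drop index)).head? with
    | none => rfl
    | some c => simpa [optIdent] using head?_dropWhile_not _ _ _ hh

theorem tryLiterals_step (src : List Char) (index : Nat) (js py : List Char)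
    (hall : ∀ c ∈ js, isIdent c = true) (X : Option (List Char × Nat)) :
    (if js.isPrefixOf (src.drop index) = true then
      (if (!optIdent src[index + js.length]?) = true then some (py, js.length) else X)
     else X) =
      (if List.takeWhile isIdent (src.drop index) = js then some (py, js.length) else X) := by
  by_cases hw : List.takeWhile isIdent (src.drop index) = js
  · obtain ⟨hpref, hnext⟩ := (prefix_next_iff_takeWhile src index js hall).mpr hw
    rw [if_pos hw, if_pos hpref, if_pos (by simp [hnext])]
  · rw [if_neg hw]
    by_cases hpref : js.isPrefixOf (src.drop index) = true
    · rw [if_pos hpref]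
      by_cases hnext : optIdent src[index + js.length]? = false
      · exact absurd ((prefix_next_iff_takeWhile src index js hall).mp ⟨hpref, hnext⟩) hw
      · rw [if_neg (by simp_all)]
    · rw [if_neg hpref]

-- characterization of A's literal scan at a boundary position, via B's maximal run
theorem tryLiterals_char (src : List Char) (index : Nat)
    (hprev : optIdent (prevOpt src index) = false) :
    tryLiterals src index litMap =
      (let w := List.takeWhile isIdent (src.drop index)
       if w = ['t','r','u','e'] then some (['T','r','u','e'], 4)
       else if w = ['f','a','l','s','e'] then some (['F','a','l','s','e'], 5)
       else if w = ['n','u','l','l'] then some (['N','o','n','e'], 4)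
       else none) := by
  have hp : (if 0 < index then src[index - 1]? else none) = prevOpt src index := rfl
  simp only [litMap, tryLiterals, hp, hprev, Bool.not_false, Bool.true_and]
  rw [tryLiterals_step src index _ _ (by intro c hc; fin_cases hc <;> decide),
      tryLiterals_step src index _ _ (by intro c hc; fin_cases hc <;> decide),
      tryLiterals_step src index _ _ (by intro c hc; fin_cases hc <;> decide)]
  rfl

-- inside an identifier run A copies character by character
theorem aLoop_copyRun (src : List Char) : ∀ (w' : List Char) (index : Nat) (result : List Char)
    (q : Char) (r : List Char),
    src.drop index = w' ++ r →
    (∀ c ∈ w', isIdent c = true) →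
    optIdent (prevOpt src index) = true →
    aLoop src result false false q index =
      aLoop src (result ++ w') false false q (index + w'.length) := by
  intro w'
  induction w' with
  | nil => intro index result q r _ _ _; simp
  | cons c ws ih =>
    intro index result q r hd hall hprev
    have hlt : index < src.length := by
      by_contra hge
      rw [List.drop_eq_nil_iff.mpr (by omega)] at hd
      simp at hd
    have hdg : src.drop index = src[index] :: src.drop (index + 1) := List.drop_eq_getElem_cons hlt
    rw [hdg] at hd
    obtain ⟨hc, hrest⟩ := List.cons.injEq .. ▸ hd
    have hci : isIdent src[index] = true := hc ▸ hall c (by simp)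
    rw [aLoop.eq_def]
    simp only [dif_pos hlt, Bool.false_eq_true, if_false,
      isIdent_ne_quote1 hci, isIdent_ne_quote2 hci, Bool.or_self]
    rw [tryLiterals_prev_ident src index hprev litMap]
    rw [ih (index + 1) (result ++ [src[index]]) q r hrest (fun x hx => hall x (by simp [hx]))
      (by simp [prevOpt, List.getElem?_eq_getElem hlt, optIdent, hci])]
    simp [hc, List.append_assoc, Nat.add_comm, Nat.add_left_comm]

theorem tryLiterals_head_nonident (src : List Char) (index : Nat)
    (h : ∀ c, (src.drop index).head? = some c → isIdent c = false) :
    tryLiterals src index litMap = none := by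
  cases hdd : src.drop index with
  | nil => simp [litMap, tryLiterals, hdd]
  | cons c t =>
    have hc : isIdent c = false := h c (by rw [hdd]; rfl)
    have h1 : c ≠ 't' := fun e => by subst e; exact absurd hc (by decide)
    have h2 : c ≠ 'f' := fun e => by subst e; exact absurd hc (by decide)
    have h3 : c ≠ 'n' := fun e => by subst e; exact absurd hc (by decide)
    simp [litMap, tryLiterals, hdd, List.isPrefixOf, beq_iff_eq, Ne.symm h1, Ne.symm h2, Ne.symm h3]

theorem main_loop (src : List Char) : ∀ (gas index : Nat) (result : List Char) (q : Char),
    src.length - index ≤ gas →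
    (optIdent (prevOpt src index) = false ∨ optIdent ((src.drop index).head?) = false) →
    aLoop src result false false q index = result ++ bLoop (src.drop index) := by
  intro gas
  induction gas with
  | zero =>
    intro index result q hg _
    have hge : src.length ≤ index := by omega
    rw [List.drop_eq_nil_iff.mpr hge, aLoop.eq_def]
    simp [Nat.not_lt.mpr hge, bLoop]
  | succ gas ih =>
    intro index result q hg hgp
    by_cases hlt : index < src.length
    case neg =>
      have hge : src.length ≤ index := by omega
      rw [List.drop_eq_nil_iff.mpr hge, aLoop.eq_def]
      simp [Nat.not_lt.mpr hge, bLoop]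
    case pos =>
    have hd : src.drop index = src[index] :: src.drop (index + 1) := List.drop_eq_getElem_cons hlt
    rw [aLoop.eq_def]
    simp only [dif_pos hlt, Bool.false_eq_true, if_false]
    by_cases hquote : (decide (src[index] = '"') || decide (src[index] = '\'')) = true
    · -- string-literal branch
      simp only [hquote, if_true]
      rw [aLoop_string src (src.length - (index + 1)) (index + 1) (result ++ [src[index]]) false
        src[index] (by omega)]
      have hqnotid : isIdent src[index] = false := by
        rcases Bool.or_eq_true_iff.mp hquote with h | h
        · rw [decide_eq_true_iff.mp h]; decide
        · rw [decide_eq_true_iff.mp h]; decide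
      have hB : bLoop (src.drop index) =
          src[index] :: ((strLoopB src[index] false (src.drop (index + 1))).1 ++
            bLoop (strLoopB src[index] false (src.drop (index + 1))).2) := by
        rw [hd, bLoop]; simp [hquote]
      rw [hB]
      have happ := strLoopB_append src[index] false (src.drop (index + 1))
      obtain ⟨P1, P2, hP⟩ : ∃ P1 P2, strLoopB src[index] false (src.drop (index + 1)) = (P1, P2) :=
        ⟨_, _, rfl⟩
      rw [hP] at happ ⊢
      simp only at happ ⊢
      have hdropP : src.drop (index + 1 + P1.length) = P2 := by
        rw [← List.drop_drop, ← happ, List.drop_left]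
      rw [ih (index + 1 + P1.length) (result ++ [src[index]] ++ P1) src[index] (by omega) ?gp]
      case gp =>
        by_cases hP2 : P2 = []
        · right; rw [hdropP, hP2]; rfl
        · left
          obtain ⟨pre, hpre⟩ := strLoopB_exit src[index] false (src.drop (index + 1)) (by
            rw [hP]; exact hP2)
          rw [hP] at hpre; simp only at hpre
          have hlen : index + 1 + P1.length - 1 = index + (pre.length + 1) := by
            rw [hpre]; simp only [List.length_append, List.length_cons, List.length_nil]; omega
          have hg1 : src[index + (pre.length + 1)]? = some src[index] := by
            rw [← List.getElem?_drop, hd, List.getElem?_cons_succ, ← happ, hpre,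
              List.append_assoc, List.getElem?_append_right (le_refl pre.length)]
            simp
          rw [prevOpt, if_pos (by omega), hlen, hg1]
          simpa [optIdent] using hqnotid
      rw [hdropP]
      simp [List.append_assoc]
    · -- code branch: no string starts here
      simp only [hquote]
      have hqf : (decide (src[index] = '"') || decide (src[index] = '\'')) = false := by
        revert hquote; cases (decide (src[index] = '"') || decide (src[index] = '\'')) <;> simp
      by_cases hident : isIdent src[index] = true
      · -- identifier run
        have hprev : optIdent (prevOpt src index) = false := by
          rcases hgp with h | h
          · exact h
          · rw [hd] at h; simp only [List.head?_cons, optIdent] at h; rw [hident] at h; cases h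
        rw [tryLiterals_char src index hprev]
        obtain ⟨W, hW⟩ : ∃ W, List.takeWhile isIdent (src.drop index) = W := ⟨_, rfl⟩
        obtain ⟨R, hR⟩ : ∃ R, List.dropWhile isIdent (src.drop index) = R := ⟨_, rfl⟩
        have hwr : W ++ R = src.drop index := by
          rw [← hW, ← hR]; exact List.takeWhile_append_dropWhile
        have hdrop2 : src.drop (index + W.length) = R := by
          rw [← List.drop_drop, ← hwr, List.drop_left]
        have hrhead : optIdent R.head? = false := by
          cases hh : R.head? with
          | none => rfl
          | some c =>
            rw [← hR] at hh
            simpa [optIdent] using head?_dropWhile_not _ _ _ hh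
        have hB : bLoop (src.drop index) = lookupLit W ++ bLoop R := by
          conv_lhs => rw [hd, bLoop]
          simp only [hqf, Bool.false_eq_true, if_false, hident, if_true, ← hd, hW, hR]
        rw [hW]
        by_cases hwt : W = ['t','r','u','e']
        · subst hwt
          show aLoop src (result ++ ['T','r','u','e']) false false q (index + 4) =
            result ++ bLoop (src.drop index)
          have hlen0 : index + 4 = index + (['t','r','u','e'] : List Char).length := rfl
          have hdrop3 : src.drop (index + 4) = R := by rw [hlen0]; exact hdrop2
          rw [ih (index + 4) (result ++ ['T','r','u','e']) q (by omega)
            (Or.inr (by rw [hdrop3]; exact hrhead))]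
          rw [hdrop3, hB]
          simp [lookupLit]
        · by_cases hwf : W = ['f','a','l','s','e']
          · subst hwf
            rw [if_neg hwt]
            show aLoop src (result ++ ['F','a','l','s','e']) false false q (index + 5) =
              result ++ bLoop (src.drop index)
            have hlen0 : index + 5 = index + (['f','a','l','s','e'] : List Char).length := rfl
            have hdrop3 : src.drop (index + 5) = R := by rw [hlen0]; exact hdrop2
            rw [ih (index + 5) (result ++ ['F','a','l','s','e']) q (by omega)
              (Or.inr (by rw [hdrop3]; exact hrhead))]
            rw [hdrop3, hB]
            simp [lookupLit]
          · by_cases hwn : W = ['n','u','l','l']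
            · subst hwn
              rw [if_neg hwt, if_neg hwf]
              show aLoop src (result ++ ['N','o','n','e']) false false q (index + 4) =
                result ++ bLoop (src.drop index)
              have hlen0 : index + 4 = index + (['n','u','l','l'] : List Char).length := rfl
              have hdrop3 : src.drop (index + 4) = R := by rw [hlen0]; exact hdrop2
              rw [ih (index + 4) (result ++ ['N','o','n','e']) q (by omega)
                (Or.inr (by rw [hdrop3]; exact hrhead))]
              rw [hdrop3, hB]
              simp [lookupLit]
            · -- a run that is not a JS literal: copied verbatim
              rw [if_neg hwt, if_neg hwf, if_neg hwn]
              show aLoop src (result ++ [src[index]]) false false q (index + 1) =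
                result ++ bLoop (src.drop index)
              have hw_cons : W = src[index] :: List.takeWhile isIdent (src.drop (index + 1)) := by
                rw [← hW, hd, List.takeWhile_cons, if_pos hident]
              have hr2 : List.dropWhile isIdent (src.drop (index + 1)) = R := by
                rw [← hR, hd, List.dropWhile_cons, if_pos hident]
              rw [aLoop_copyRun src (List.takeWhile isIdent (src.drop (index + 1))) (index + 1)
                (result ++ [src[index]]) q R
                (by rw [← hr2]; exact (List.takeWhile_append_dropWhile).symm)
                (fun x hx => List.mem_takeWhile_imp hx)
                (by simp [prevOpt, List.getElem?_eq_getElem hlt, optIdent, hident])]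
              have hlen2 : index + 1 + (List.takeWhile isIdent (src.drop (index + 1))).length =
                  index + W.length := by
                rw [hw_cons]; simp only [List.length_cons]; omega
              rw [hlen2, ih (index + W.length)
                (result ++ [src[index]] ++ List.takeWhile isIdent (src.drop (index + 1))) q
                (by rw [hw_cons]; simp only [List.length_cons]; omega)
                (Or.inr (by rw [hdrop2]; exact hrhead))]
              rw [hdrop2, hB,
                (show lookupLit W = W from by simp [lookupLit, hwt, hwf, hwn]), hw_cons]
              simp [List.append_assoc]
      · -- plain non-identifier character: copied
        have hident' : isIdent src[index] = false := by
          revert hident; cases isIdent src[index] <;> simp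
        rw [tryLiterals_head_nonident src index (by
          intro c hc; rw [hd] at hc; simp only [List.head?_cons, Option.some.injEq] at hc
          rw [← hc]; exact hident')]
        rw [ih (index + 1) (result ++ [src[index]]) q (by omega)
          (Or.inl (by simp [prevOpt, List.getElem?_eq_getElem hlt, optIdent, hident']))]
        conv_rhs => rw [hd, bLoop]
        simp [hqf, hident', List.append_assoc]

-- ===== VERDICT (by name: the statement is the Claim_ definition above) =====
theorem replace_js_literals_spec : Claim_equal_replace_js_literals := by
  intro source _
  unfold Spec_replace_js_literals replace_js_literals replace_js_literals_alt
  have h := main_loop source.toList source.toList.length 0 [] ' ' (by omega)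
    (by simp [prevOpt, optIdent])
  rw [List.drop_zero, List.nil_append] at h
  rw [h]
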